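-- pv_equiv track=rewrite | github.com/MrSkl1f/CG | 1lab/firstlab.py | findSuitableCircles
-- ===== SOURCE A (Python) =====
-- def findSuitableCircles(tmp, resultArr):
--     countOfCircles = len(tmp[0])
--     for i in range(countOfCircles):
--         for j in range(i + 1, countOfCircles):
--             if tmp[0][i] + tmp[2][i] == tmp[0][j] - tmp[2][j] and tmp[1][i] != tmp[1][j]:
--                 resultArr.append([[tmp[0][i], tmp[1][i], tmp[2][i]], [tmp[0][j], tmp[1][j], tmp[2][j]]])
--             if tmp[0][i] - tmp[2][i] == tmp[0][j] + tmp[2][j] and tmp[1][i] != tmp[1][j]: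
--                 resultArr.append([[tmp[0][j], tmp[1][j], tmp[2][j]], [tmp[0][i], tmp[1][i], tmp[2][i]]])
--     return resultArr
-- ===== SOURCE B (Python) =====
-- def findSuitableCircles(tmp, resultArr):
--     # Hash-join on tangency keys instead of the all-pairs scan.
--     # Mutates resultArr in place (appends), like the original.
--     n = len(tmp[0])
--     if n < 2:
--         return resultArr
--     xs, ys, rs = tmp[0], tmp[1], tmp[2]
--     right = {}  # x - r -> indices, increasing
--     for j in range(n):
--         right.setdefault(xs[j] - rs[j], []).append(j)
--     left = {}   # x + r -> indices, increasing
--     for j in range(n):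
--         left.setdefault(xs[j] + rs[j], []).append(j)
--     for i in range(n):
--         l1 = [j for j in right.get(xs[i] + rs[i], []) if j > i]
--         l2 = [j for j in left.get(xs[i] - rs[i], []) if j > i]
--         a = b = 0
--         while a < len(l1) or b < len(l2):
--             if b >= len(l2) or (a < len(l1) and l1[a] <= l2[b]):
--                 j = l1[a]; a += 1
--                 if ys[i] != ys[j]:
--                     resultArr.append([[xs[i], ys[i], rs[i]], [xs[j], ys[j], rs[j]]])
--             else:
--                 j = l2[b]; b += 1
--                 if ys[i] != ys[j]:
--                     resultArr.append([[xs[j], ys[j], rs[j]], [xs[i], ys[i], rs[i]]])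
--     return resultArr
-- ===== Notes on version B (the rewrite author's own statement) =====
-- stated objective: faster
-- what changed: Replaces the all-pairs double loop with a hash join: indices are bucketed once by x-r and x+r, and each circle only merges the two looked-up buckets of larger indices in index order.
import Mathlib
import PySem

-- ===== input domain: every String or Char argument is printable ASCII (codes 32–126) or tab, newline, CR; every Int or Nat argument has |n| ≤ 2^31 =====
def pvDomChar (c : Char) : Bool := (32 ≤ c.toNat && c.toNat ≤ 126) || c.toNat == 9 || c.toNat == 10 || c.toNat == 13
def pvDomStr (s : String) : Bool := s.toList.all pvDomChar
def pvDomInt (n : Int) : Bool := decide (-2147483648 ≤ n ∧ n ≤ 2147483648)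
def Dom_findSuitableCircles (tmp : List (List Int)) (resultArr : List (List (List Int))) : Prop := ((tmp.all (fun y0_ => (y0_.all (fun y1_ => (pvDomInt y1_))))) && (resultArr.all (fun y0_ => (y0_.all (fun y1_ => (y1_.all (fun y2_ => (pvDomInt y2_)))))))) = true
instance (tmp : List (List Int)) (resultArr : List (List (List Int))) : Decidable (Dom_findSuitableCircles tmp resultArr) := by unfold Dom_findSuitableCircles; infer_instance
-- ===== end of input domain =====

-- B replaces A's all-pairs scan by a hash join: buckets of indices keyed by x-r and x+r,
-- looked up per circle and merged in index order.  resultArr is extended (mutated) in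
-- both Pythons; the theorems are about the returned value.

-- shared tiny accessors (both Pythons index tmp[0]/tmp[1]/tmp[2] the same way; in range under Pre_)
def pvX (tmp : List (List Int)) (k : Nat) : Int := (tmp.getD 0 []).getD k 0
def pvY (tmp : List (List Int)) (k : Nat) : Int := (tmp.getD 1 []).getD k 0
def pvR (tmp : List (List Int)) (k : Nat) : Int := (tmp.getD 2 []).getD k 0
def pvC (tmp : List (List Int)) (k : Nat) : List Int := [pvX tmp k, pvY tmp k, pvR tmp k]

-- ===== PORT A =====
def findSuitableCircles (tmp : List (List Int)) (resultArr : List (List (List Int))) : List (List (List Int)) :=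
  let n := (tmp.getD 0 []).length
  (List.range n).foldl (fun acc i =>
    (List.range' (i + 1) (n - (i + 1))).foldl (fun acc2 j =>
      let acc3 := if pvX tmp i + pvR tmp i = pvX tmp j - pvR tmp j ∧ pvY tmp i ≠ pvY tmp j
                  then acc2 ++ [[pvC tmp i, pvC tmp j]] else acc2
      if pvX tmp i - pvR tmp i = pvX tmp j + pvR tmp j ∧ pvY tmp i ≠ pvY tmp j
      then acc3 ++ [[pvC tmp j, pvC tmp i]] else acc3) acc) resultArr

-- ===== PORT B =====
-- entry emitted for a cond-1 match (i before j) / cond-2 match (j before i); empty if same y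
def pvE1 (tmp : List (List Int)) (i j : Nat) : List (List (List Int)) :=
  if pvY tmp i ≠ pvY tmp j then [[pvC tmp i, pvC tmp j]] else []
def pvE2 (tmp : List (List Int)) (i j : Nat) : List (List (List Int)) :=
  if pvY tmp i ≠ pvY tmp j then [[pvC tmp j, pvC tmp i]] else []

-- the while-loop of Source B: merge the two increasing index lists, l1 winning ties
def pvMerge (f g : Nat → List (List (List Int))) : List Nat → List Nat → List (List (List Int))
  | [], [] => []
  | a :: as, [] => f a ++ pvMerge f g as []
  | [], b :: bs => g b ++ pvMerge f g [] bs
  | a :: as, b :: bs =>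
      if a ≤ b then f a ++ pvMerge f g as (b :: bs)
      else g b ++ pvMerge f g (a :: as) bs
  termination_by l1 l2 => l1.length + l2.length

-- the bucket-building loop of Source B ('d.setdefault(key(j), []).append(j)')
def pvBuckets (key : Nat → Int) (n : Nat) : PySem.Dict Int (List Nat) :=
  (List.range n).foldl (fun d j => d.insert (key j) (d.getD (key j) [] ++ [j])) PySem.Dict.empty

def findSuitableCircles_alt (tmp : List (List Int)) (resultArr : List (List (List Int))) : List (List (List Int)) :=
  let n := (tmp.getD 0 []).length
  if n < 2 then resultArr
  else
    let right := pvBuckets (fun j => pvX tmp j - pvR tmp j) n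
    let left  := pvBuckets (fun j => pvX tmp j + pvR tmp j) n
    (List.range n).foldl (fun acc i =>
      acc ++ pvMerge (pvE1 tmp i) (pvE2 tmp i)
        ((right.getD (pvX tmp i + pvR tmp i) []).filter (fun j => decide (i < j)))
        ((left.getD (pvX tmp i - pvR tmp i) []).filter (fun j => decide (i < j)))) resultArr

-- ===== PRECONDITION & SPEC =====
-- Exactly the inputs on which the Python A returns (no IndexError): tmp nonempty; if there are at
-- least two circles, tmp needs three rows with rows 0 and 2 of full length, and row 1 (the ys) long
-- enough at every index pair whose tangency keys match — only there does A (short-circuit 'and')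
-- ever read row 1.
def Pre_findSuitableCircles (tmp : List (List Int)) (_resultArr : List (List (List Int))) : Prop :=
  tmp ≠ [] ∧
  ((tmp.getD 0 []).length ≤ 1 ∨
    (3 ≤ tmp.length ∧ (tmp.getD 0 []).length ≤ (tmp.getD 2 []).length ∧
      ∀ i < (tmp.getD 0 []).length, ∀ j < (tmp.getD 0 []).length, i < j →
        (pvX tmp i + pvR tmp i = pvX tmp j - pvR tmp j ∨
         pvX tmp i - pvR tmp i = pvX tmp j + pvR tmp j) →
        i < (tmp.getD 1 []).length ∧ j < (tmp.getD 1 []).length))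
instance (tmp : List (List Int)) (resultArr : List (List (List Int))) : Decidable (Pre_findSuitableCircles tmp resultArr) := by unfold Pre_findSuitableCircles; infer_instance

def pvWitness_findSuitableCircles : List (List Int) × List (List (List Int)) :=
  ([[0, 4], [0, 5], [2, 2]], [])

def Spec_findSuitableCircles (tmp : List (List Int)) (resultArr : List (List (List Int))) (out : List (List (List Int))) : Prop := out = findSuitableCircles_alt tmp resultArr
instance (tmp : List (List Int)) (resultArr : List (List (List Int))) (out : List (List (List Int))) : Decidable (Spec_findSuitableCircles tmp resultArr out) := by unfold Spec_findSuitableCircles; infer_instance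

-- ===== CLAIM (what is proved, stated in full; the proofs are below) =====
def Claim_equal_findSuitableCircles : Prop := ∀ (tmp : List (List Int)) (resultArr : List (List (List Int))), Dom_findSuitableCircles tmp resultArr → Pre_findSuitableCircles tmp resultArr → Spec_findSuitableCircles tmp resultArr (findSuitableCircles tmp resultArr)

-- ===== LEMMAS AND PROOFS =====

-- per-pair contribution of A's inner loop body
def pvSeg (tmp : List (List Int)) (i j : Nat) : List (List (List Int)) :=
  (if pvX tmp i + pvR tmp i = pvX tmp j - pvR tmp j ∧ pvY tmp i ≠ pvY tmp j
   then [[pvC tmp i, pvC tmp j]] else []) ++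
  (if pvX tmp i - pvR tmp i = pvX tmp j + pvR tmp j ∧ pvY tmp i ≠ pvY tmp j
   then [[pvC tmp j, pvC tmp i]] else [])

theorem pvBuckets_getD (key : Nat → Int) (n : Nat) (k : Int) :
    (pvBuckets key n).getD k [] = (List.range n).filter (fun j => decide (key j = k)) := by
  have h : ∀ (l : List Nat) (d : PySem.Dict Int (List Nat)),
      (l.foldl (fun d j => d.insert (key j) (d.getD (key j) [] ++ [j])) d).getD k [] =
        d.getD k [] ++ l.filter (fun j => decide (key j = k)) := by
    intro l
    induction l with
    | nil => intro d; simp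
    | cons j l ih =>
      intro d
      simp only [List.foldl_cons, ih, List.filter_cons]
      rw [PySem.Dict.getD_insert]
      by_cases hk : key j = k
      · simp [hk]
      · have : ¬ (k = key j) := fun h' => hk h'.symm
        simp [hk, this]
  simpa using h (List.range n) PySem.Dict.empty

theorem pvMerge_cons_left (f g : Nat → List (List (List Int))) (u : Nat) (F G : List Nat)
    (h : ∀ b ∈ G, u ≤ b) : pvMerge f g (u :: F) G = f u ++ pvMerge f g F G := by
  cases G with
  | nil => simp [pvMerge]
  | cons b bs => simp [pvMerge, h b (by simp)]

theorem pvMerge_cons_right (f g : Nat → List (List (List Int))) (u : Nat) (F G : List Nat)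
    (h : ∀ a ∈ F, u < a) : pvMerge f g F (u :: G) = g u ++ pvMerge f g F G := by
  cases F with
  | nil => simp [pvMerge]
  | cons a as =>
    have : ¬ a ≤ u := by have := h a (by simp); omega
    simp [pvMerge, this]

theorem pvMerge_filter (f g : Nat → List (List (List Int))) (us : List Nat)
    (hus : us.Pairwise (· < ·)) (p q : Nat → Bool) :
    pvMerge f g (us.filter p) (us.filter q) =
      us.flatMap (fun j => (if p j then f j else []) ++ (if q j then g j else [])) := by
  induction us with
  | nil => simp [pvMerge]
  | cons u rest ih =>
    have hlt : ∀ a ∈ rest, u < a := (List.pairwise_cons.mp hus).1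
    have hrest := (List.pairwise_cons.mp hus).2
    have hF : ∀ a ∈ rest.filter p, u < a := fun a ha => hlt a (List.mem_of_mem_filter ha)
    have hG : ∀ b ∈ rest.filter q, u ≤ b := fun b hb => le_of_lt (hlt b (List.mem_of_mem_filter hb))
    simp only [List.filter_cons, List.flatMap_cons]
    by_cases hp : p u <;> by_cases hq : q u <;> simp only [hp, hq, if_pos, if_neg, Bool.false_eq_true,
      not_false_iff]
    · rw [pvMerge_cons_left f g u _ _ (fun b hb => by
        rcases List.mem_cons.mp hb with h | h
        · omega
        · exact hG b h)]
      rw [pvMerge_cons_right f g u _ _ hF, ih hrest]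
      simp
    · rw [pvMerge_cons_left f g u _ _ hG, ih hrest]; simp
    · rw [pvMerge_cons_right f g u _ _ hF, ih hrest]; simp
    · rw [ih hrest]; simp

theorem pvRange_filter_lt (n i : Nat) :
    (List.range n).filter (fun j => decide (i < j)) = List.range' (i + 1) (n - (i + 1)) := by
  induction n with
  | zero => simp
  | succ n ih =>
    rw [List.range_succ, List.filter_append, ih]
    by_cases h : i < n
    · have h1 : n - (i + 1) + 1 = n + 1 - (i + 1) := by omega
      have h2 : i + 1 + (n - (i + 1)) = n := by omega
      simp only [List.filter_cons, List.filter_nil, h, decide_true, ite_true]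
      rw [← h1, List.range'_concat]
      simp [h2]
    · have h1 : n + 1 - (i + 1) = n - (i + 1) := by omega
      simp [h, h1]

theorem pvInner_eq (tmp : List (List Int)) (i : Nat) (us : List Nat)
    (acc : List (List (List Int))) :
    us.foldl (fun acc2 j =>
      let acc3 := if pvX tmp i + pvR tmp i = pvX tmp j - pvR tmp j ∧ pvY tmp i ≠ pvY tmp j
                  then acc2 ++ [[pvC tmp i, pvC tmp j]] else acc2
      if pvX tmp i - pvR tmp i = pvX tmp j + pvR tmp j ∧ pvY tmp i ≠ pvY tmp j
      then acc3 ++ [[pvC tmp j, pvC tmp i]] else acc3) acc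
    = acc ++ us.flatMap (pvSeg tmp i) := by
  have : (fun (acc2 : List (List (List Int))) (j : Nat) =>
      let acc3 := if pvX tmp i + pvR tmp i = pvX tmp j - pvR tmp j ∧ pvY tmp i ≠ pvY tmp j
                  then acc2 ++ [[pvC tmp i, pvC tmp j]] else acc2
      if pvX tmp i - pvR tmp i = pvX tmp j + pvR tmp j ∧ pvY tmp i ≠ pvY tmp j
      then acc3 ++ [[pvC tmp j, pvC tmp i]] else acc3)
      = fun acc2 j => acc2 ++ pvSeg tmp i j := by
    funext acc2 j
    simp only [pvSeg]
    split_ifs <;> simp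
  rw [this, PySem.List.foldl_append_eq_flatMap]

theorem pvMergeTerm_eq (tmp : List (List Int)) (n i : Nat) :
    pvMerge (pvE1 tmp i) (pvE2 tmp i)
      (((pvBuckets (fun j => pvX tmp j - pvR tmp j) n).getD (pvX tmp i + pvR tmp i) []).filter
        (fun j => decide (i < j)))
      (((pvBuckets (fun j => pvX tmp j + pvR tmp j) n).getD (pvX tmp i - pvR tmp i) []).filter
        (fun j => decide (i < j)))
    = (List.range' (i + 1) (n - (i + 1))).flatMap (pvSeg tmp i) := by
  rw [pvBuckets_getD, pvBuckets_getD, List.filter_filter, List.filter_filter]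
  have hc : ∀ (P : Nat → Bool), (List.range n).filter (fun j => decide (i < j) && P j)
      = (List.range' (i + 1) (n - (i + 1))).filter P := by
    intro P
    have : (fun j => decide (i < j) && P j) = (fun j => P j && decide (i < j)) := by
      funext j; exact Bool.and_comm _ _
    rw [this, ← List.filter_filter, pvRange_filter_lt]
  rw [hc, hc]
  rw [pvMerge_filter _ _ _ (List.pairwise_lt_range' 1) _ _]
  apply List.flatMap_congr
  intro j _
  simp only [pvSeg, pvE1, pvE2]
  by_cases h1 : pvX tmp j - pvR tmp j = pvX tmp i + pvR tmp i <;>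
    by_cases h2 : pvX tmp j + pvR tmp j = pvX tmp i - pvR tmp i <;>
    by_cases hy : pvY tmp i ≠ pvY tmp j <;>
    simp [h1, h2, hy, eq_comm] <;> omega

theorem pv_eq (tmp : List (List Int)) (resultArr : List (List (List Int))) :
    findSuitableCircles tmp resultArr = findSuitableCircles_alt tmp resultArr := by
  unfold findSuitableCircles findSuitableCircles_alt
  set n := (tmp.getD 0 []).length with hn
  have hA : (List.range n).foldl (fun acc i =>
      (List.range' (i + 1) (n - (i + 1))).foldl (fun acc2 j =>
        let acc3 := if pvX tmp i + pvR tmp i = pvX tmp j - pvR tmp j ∧ pvY tmp i ≠ pvY tmp j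
                    then acc2 ++ [[pvC tmp i, pvC tmp j]] else acc2
        if pvX tmp i - pvR tmp i = pvX tmp j + pvR tmp j ∧ pvY tmp i ≠ pvY tmp j
        then acc3 ++ [[pvC tmp j, pvC tmp i]] else acc3) acc) resultArr
      = resultArr ++ (List.range n).flatMap
          (fun i => (List.range' (i + 1) (n - (i + 1))).flatMap (pvSeg tmp i)) := by
    have hfun : (fun (acc : List (List (List Int))) (i : Nat) =>
        (List.range' (i + 1) (n - (i + 1))).foldl (fun acc2 j =>
          let acc3 := if pvX tmp i + pvR tmp i = pvX tmp j - pvR tmp j ∧ pvY tmp i ≠ pvY tmp j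
                      then acc2 ++ [[pvC tmp i, pvC tmp j]] else acc2
          if pvX tmp i - pvR tmp i = pvX tmp j + pvR tmp j ∧ pvY tmp i ≠ pvY tmp j
          then acc3 ++ [[pvC tmp j, pvC tmp i]] else acc3) acc)
        = fun acc i => acc ++ (List.range' (i + 1) (n - (i + 1))).flatMap (pvSeg tmp i) := by
      funext acc i; exact pvInner_eq tmp i _ acc
    rw [hfun, PySem.List.foldl_append_eq_flatMap]
  rw [hA]
  by_cases hsmall : n < 2
  · rw [if_pos hsmall]
    interval_cases n <;> simp
  · rw [if_neg hsmall]
    dsimp only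
    have hB : (fun (acc : List (List (List Int))) (i : Nat) =>
        acc ++ pvMerge (pvE1 tmp i) (pvE2 tmp i)
          (((pvBuckets (fun j => pvX tmp j - pvR tmp j) n).getD (pvX tmp i + pvR tmp i) []).filter
            (fun j => decide (i < j)))
          (((pvBuckets (fun j => pvX tmp j + pvR tmp j) n).getD (pvX tmp i - pvR tmp i) []).filter
            (fun j => decide (i < j))))
        = fun acc i => acc ++ (List.range' (i + 1) (n - (i + 1))).flatMap (pvSeg tmp i) := by
      funext acc i; rw [pvMergeTerm_eq]
    rw [hB, PySem.List.foldl_append_eq_flatMap]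

-- ===== VERDICT (by name: the statement is the Claim_ definition above) =====
theorem findSuitableCircles_spec : Claim_equal_findSuitableCircles := by
  intro tmp resultArr _ _
  unfold Spec_findSuitableCircles
  exact pv_eq tmp resultArr
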